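-- pv_equiv track=rewrite | github.com/rahulkhandait-sde/s3 | Flask/feedback_analysis_test.py | cluster_by_policy
-- ===== SOURCE A (Python) =====
-- from collections import defaultdict
--
-- def cluster_by_policy(objects):
--     clustered = defaultdict(list)  # Use defaultdict for easy grouping
--
--     for obj in objects:
--         policy = obj['predicted_policy']
--         clustered[policy].append(obj)
--
--     result = []
--     for policy, group in clustered.items():
--         result.append(group)  # Each group is a list of objects
--
--     return result
-- ===== SOURCE B (Python) =====
-- def cluster_by_policy(objects):
--     # Two-phase: collect distinct policies in first-appearance order, then filter per policy.
--     seen = []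
--     for obj in objects:
--         p = obj['predicted_policy']
--         if p not in seen:
--             seen.append(p)
--     return [[obj for obj in objects if obj['predicted_policy'] == p] for p in seen]
-- ===== Notes on version B (the rewrite author's own statement) =====
-- stated objective: alternative
-- what changed: Replaces the single defaultdict grouping pass with an ordered distinct-policy list plus one filtering scan of the objects per distinct policy (no dict at all).
import Mathlib
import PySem

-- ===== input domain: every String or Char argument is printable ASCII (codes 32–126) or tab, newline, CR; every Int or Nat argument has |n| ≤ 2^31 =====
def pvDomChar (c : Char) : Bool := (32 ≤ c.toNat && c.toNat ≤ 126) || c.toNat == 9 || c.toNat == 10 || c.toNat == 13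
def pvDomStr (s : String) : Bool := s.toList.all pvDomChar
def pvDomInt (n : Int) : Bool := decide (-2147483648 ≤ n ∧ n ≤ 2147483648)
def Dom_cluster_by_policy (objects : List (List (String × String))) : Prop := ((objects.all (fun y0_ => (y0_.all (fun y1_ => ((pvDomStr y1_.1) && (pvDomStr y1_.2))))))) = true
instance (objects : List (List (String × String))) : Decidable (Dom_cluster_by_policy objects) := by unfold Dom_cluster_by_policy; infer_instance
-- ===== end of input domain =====

-- B differs from A by algorithm only (alternative decomposition); return values agree on Pre_.

-- obj['predicted_policy'] as a total function; exact whenever the key is present (guaranteed by Pre_)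
def pvKey (obj : List (String × String)) : String :=
  (PySem.Dict.mk obj).getD "predicted_policy" ""

-- ===== PORT A =====
def cluster_by_policy (objects : List (List (String × String))) : List (List (List (String × String))) :=
  let clustered :=
    objects.foldl (fun d obj => d.modify (pvKey obj) [] (fun g => g ++ [obj])) PySem.Dict.empty
  clustered.items.foldl (fun result p => result ++ [p.2]) []

-- ===== PORT B =====
def cluster_by_policy_alt (objects : List (List (String × String))) : List (List (List (String × String))) :=
  let seen : PySem.Set String :=
    objects.foldl (fun s obj => PySem.Set.add s (pvKey obj)) PySem.Set.empty
  seen.map (fun p => objects.filter (fun obj => pvKey obj == p))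

-- ===== PRECONDITION & SPEC =====
-- Pre_ excludes exactly the inputs where some object lacks the 'predicted_policy' key, on which A raises KeyError.
def Pre_cluster_by_policy (objects : List (List (String × String))) : Prop :=
  (objects.all (fun obj => obj.any (fun kv => kv.1 == "predicted_policy"))) = true
instance (objects : List (List (String × String))) : Decidable (Pre_cluster_by_policy objects) := by unfold Pre_cluster_by_policy; infer_instance
def pvWitness_cluster_by_policy : (List (List (String × String))) :=
  [[("predicted_policy", "a"), ("v", "1")], [("predicted_policy", "b")], [("predicted_policy", "a")]]

def Spec_cluster_by_policy (objects : List (List (String × String))) (out : List (List (List (String × String)))) : Prop := out = cluster_by_policy_alt objects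
instance (objects : List (List (String × String))) (out : List (List (List (String × String)))) : Decidable (Spec_cluster_by_policy objects out) := by unfold Spec_cluster_by_policy; infer_instance

-- ===== CLAIM (what is proved, stated in full; the proofs are below) =====
def Claim_equal_cluster_by_policy : Prop := ∀ (objects : List (List (String × String))), Dom_cluster_by_policy objects → Pre_cluster_by_policy objects → Spec_cluster_by_policy objects (cluster_by_policy objects)

-- ===== LEMMAS AND PROOFS =====

-- A's grouping dict, lifted to a fold over key/value pairs so the Dict library lemmas apply
theorem pv_clustered_eq (objects : List (List (String × String))) :
    objects.foldl (fun d obj => d.modify (pvKey obj) [] (fun g => g ++ [obj])) PySem.Dict.empty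
      = (objects.map (fun o => (pvKey o, o))).foldl
          (fun d p => d.modify p.1 [] (fun g => g ++ [p.2])) PySem.Dict.empty := by
  rw [List.foldl_map]

theorem pv_seen_eq (objects : List (List (String × String))) :
    objects.foldl (fun s obj => PySem.Set.add s (pvKey obj)) PySem.Set.empty
      = PySem.Set.update PySem.Set.empty (objects.map pvKey) := by
  rw [PySem.Set.update, List.foldl_map]

-- ===== VERDICT (by name: the statement is the Claim_ definition above) =====
theorem cluster_by_policy_spec : Claim_equal_cluster_by_policy := by
  intro objects _ _
  unfold Spec_cluster_by_policy cluster_by_policy cluster_by_policy_alt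
  simp only [pv_clustered_eq, pv_seen_eq]
  set l := objects.map (fun o => (pvKey o, o)) with hl
  set d := l.foldl (fun d p => d.modify p.1 [] (fun g => g ++ [p.2])) PySem.Dict.empty with hd
  have hnd : d.keys.Nodup := by
    rw [hd]
    exact PySem.Dict.nodup_keys_foldl_modify_key l Prod.fst [] _ _ PySem.Dict.nodup_keys_empty
  have hkeys : d.keys = PySem.Set.update (PySem.Dict.empty : PySem.Dict String (List (List (String × String)))).keys (l.map Prod.fst) := by
    rw [hd]; exact PySem.Dict.keys_foldl_modify_key l Prod.fst [] _ _
  have hmapfst : l.map Prod.fst = objects.map pvKey := by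
    rw [hl, List.map_map]; rfl
  rw [PySem.List.foldl_append_singleton_eq_map,
      show d.items.map Prod.snd = d.values from rfl,
      PySem.Dict.values_eq_map_keys d hnd [], hkeys, hmapfst]
  simp only [PySem.Dict.keys_empty, PySem.Set.empty, List.nil_append]
  apply List.map_congr_left
  intro k _
  rw [hd, PySem.Dict.getD_foldl_modify_append, PySem.Dict.getD_empty, hl]
  simp [List.filter_map, List.map_map, Function.comp_def]
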